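-- pv_equiv track=rewrite | github.com/Aoi-hosizora/NER-BiLSTM-CRF-Affix-PyTorch | utils.py | get_words_affix_ids
-- ===== SOURCE A (Python) =====
-- from typing import Tuple, List, Dict, TypeVar
--
-- def get_words_affix_ids(sentence_words: List[str], prefix_dicts: List[Dict[str, int]], suffix_dicts: List[Dict[str, int]]) -> Tuple[List[List[int]], List[List[int]]]:
--     def get_prefixes_suffixes(word: str) -> Tuple[List[str], List[str]]:
--         prefixes = ['', '', '', '']
--         suffixes = ['', '', '', '']
--         if len(word) == 1:
--             prefixes[0] = word[:1]
--             suffixes[0] = word[-1:]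
--         elif len(word) == 2:
--             prefixes[0] = word[:1]
--             suffixes[0] = word[-1:]
--             prefixes[1] = word[:2]
--             suffixes[1] = word[-2:]
--         elif len(word) == 3:
--             prefixes[0] = word[:1]
--             suffixes[0] = word[-1:]
--             prefixes[1] = word[:2]
--             suffixes[1] = word[-2:]
--             prefixes[2] = word[:3]
--             suffixes[2] = word[-3:]
--         elif len(word) > 3:
--             prefixes[0] = word[:1]
--             suffixes[0] = word[-1:]
--             prefixes[1] = word[:2]
--             suffixes[1] = word[-2:]
--             prefixes[2] = word[:3]
--             suffixes[2] = word[-3:]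
--             prefixes[3] = word[:4]
--             suffixes[3] = word[-4:]
--         return prefixes, suffixes
--
--     words_prefix_ids, words_suffix_ids = [], []
--     for word in sentence_words:
--         prefix_ids, suffix_ids = [], []
--         prefixes, suffixes = get_prefixes_suffixes(word)
--         for n, prefix in enumerate(prefixes):
--             prefix_ids.append(prefix_dicts[n][prefix] if prefix in prefix_dicts[n] else 0)
--         for n, suffix in enumerate(suffixes):
--             suffix_ids.append(suffix_dicts[n][suffix] if suffix in suffix_dicts[n] else 0)
--         words_prefix_ids.append(prefix_ids)
--         words_suffix_ids.append(suffix_ids)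
--     return words_prefix_ids, words_suffix_ids
-- ===== SOURCE B (Python) =====
-- def get_words_affix_ids(sentence_words, prefix_dicts, suffix_dicts):
--     # Column-major: one pass per affix length n (0..3) over the whole sentence,
--     # then transpose the 4 columns into per-word rows with zip(*...).
--     pre_cols = [[prefix_dicts[n].get(w[:n + 1] if len(w) > n else '', 0)
--                  for w in sentence_words] for n in range(4)]
--     suf_cols = [[suffix_dicts[n].get(w[-(n + 1):] if len(w) > n else '', 0)
--                  for w in sentence_words] for n in range(4)]
--     return [list(r) for r in zip(*pre_cols)], [list(r) for r in zip(*suf_cols)]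
-- ===== Notes on version B (the rewrite author's own statement) =====
-- stated objective: alternative
-- what changed: B traverses column-major: for each affix length n (0..3) it builds one whole-sentence column of ids, then transposes the 4 columns into per-word rows with zip(*...), instead of A's row-major pass with a 4-way length-ladder helper per word.
import Mathlib
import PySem

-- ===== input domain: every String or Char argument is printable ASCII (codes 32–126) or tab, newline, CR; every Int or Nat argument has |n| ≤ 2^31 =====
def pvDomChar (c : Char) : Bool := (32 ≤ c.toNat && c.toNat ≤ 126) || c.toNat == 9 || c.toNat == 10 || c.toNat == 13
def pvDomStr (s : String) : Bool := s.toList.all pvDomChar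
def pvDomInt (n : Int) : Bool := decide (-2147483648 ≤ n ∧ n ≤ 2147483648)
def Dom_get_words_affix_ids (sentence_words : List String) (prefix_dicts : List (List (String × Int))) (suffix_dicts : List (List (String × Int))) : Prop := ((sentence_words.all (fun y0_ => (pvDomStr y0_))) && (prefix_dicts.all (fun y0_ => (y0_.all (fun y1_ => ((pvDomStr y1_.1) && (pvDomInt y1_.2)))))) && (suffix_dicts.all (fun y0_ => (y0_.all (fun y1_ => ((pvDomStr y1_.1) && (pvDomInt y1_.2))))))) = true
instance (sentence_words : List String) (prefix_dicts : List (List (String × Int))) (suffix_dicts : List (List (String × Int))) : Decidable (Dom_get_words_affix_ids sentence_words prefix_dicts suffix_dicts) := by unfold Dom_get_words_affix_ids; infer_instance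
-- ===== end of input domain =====

-- B builds one whole-sentence column of ids per affix length n (0..3) and transposes
-- the columns into per-word rows with zip(*...), instead of A's per-word length ladder
-- (objective: alternative traversal order, same cost).

-- dict lookup 'd[k] if k in d else 0' / 'd.get(k, 0)' on an association list (first match)
def pvAffixGetD0 (d : List (String × Int)) (k : String) : Int :=
  match d.find? (fun p => p.1 == k) with
  | some p => p.2
  | none => 0

-- ===== PORT A =====
-- A's inner helper: the if/elif length ladder filling ['','','',''] in place
def pvGetPrefixesSuffixes (word : String) : List String × List String :=
  let L : Int := PySem.Str.len word
  if L = 1 then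
    ([PySem.Str.slice word none (some 1), "", "", ""],
     [PySem.Str.slice word (some (-1)) none, "", "", ""])
  else if L = 2 then
    ([PySem.Str.slice word none (some 1), PySem.Str.slice word none (some 2), "", ""],
     [PySem.Str.slice word (some (-1)) none, PySem.Str.slice word (some (-2)) none, "", ""])
  else if L = 3 then
    ([PySem.Str.slice word none (some 1), PySem.Str.slice word none (some 2),
      PySem.Str.slice word none (some 3), ""],
     [PySem.Str.slice word (some (-1)) none, PySem.Str.slice word (some (-2)) none,
      PySem.Str.slice word (some (-3)) none, ""])
  else if L > 3 then
    ([PySem.Str.slice word none (some 1), PySem.Str.slice word none (some 2),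
      PySem.Str.slice word none (some 3), PySem.Str.slice word none (some 4)],
     [PySem.Str.slice word (some (-1)) none, PySem.Str.slice word (some (-2)) none,
      PySem.Str.slice word (some (-3)) none, PySem.Str.slice word (some (-4)) none])
  else (["", "", "", ""], ["", "", "", ""])

-- prefix_dicts[n]: none = IndexError, excluded by Pre_; default [] outside Pre_
def get_words_affix_ids (sentence_words : List String) (prefix_dicts : List (List (String × Int))) (suffix_dicts : List (List (String × Int))) : List (List Int) × List (List Int) :=
  sentence_words.foldl
    (fun acc word =>
      let ps := pvGetPrefixesSuffixes word
      let prefix_ids := (PySem.List.enumerate ps.1).map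
        (fun np => pvAffixGetD0 (PySem.List.pyGetD prefix_dicts np.1 []) np.2)
      let suffix_ids := (PySem.List.enumerate ps.2).map
        (fun ns => pvAffixGetD0 (PySem.List.pyGetD suffix_dicts ns.1 []) ns.2)
      (acc.1 ++ [prefix_ids], acc.2 ++ [suffix_ids]))
    ([], [])

-- ===== PORT B =====
-- one step of zip(*cols): the heads of every column and the remaining tails
-- (none exactly when some column is exhausted — zip stops there)
def pvHeads : List (List Int) → Option (List Int × List (List Int))
  | [] => some ([], [])
  | [] :: _ => none
  | (x :: xs) :: rest =>
    match pvHeads rest with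
    | some (hs, ts) => some (x :: hs, xs :: ts)
    | none => none

theorem pvHeads_sum (cols hs ts) (h : pvHeads cols = some (hs, ts)) :
    (ts.map List.length).sum + cols.length = (cols.map List.length).sum := by
  induction cols generalizing hs ts with
  | nil => simp [pvHeads] at h; simp [h.2]
  | cons c rest ih =>
    match c with
    | [] => simp [pvHeads] at h
    | x :: xs =>
      simp only [pvHeads] at h
      cases hr : pvHeads rest with
      | none => rw [hr] at h; simp at h
      | some p =>
        rw [hr] at h
        obtain ⟨hs', ts'⟩ := p
        simp only [Option.some.injEq, Prod.mk.injEq] at h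
        have := ih hs' ts' hr
        simp [← h.2, List.map_cons]
        omega

-- transpose: Python's zip(*cols); zip() of no columns is empty
def pvZipStar (cols : List (List Int)) : List (List Int) :=
  match cols with
  | [] => []
  | c :: rest =>
    match h : pvHeads (c :: rest) with
    | none => []
    | some (hs, ts) => hs :: pvZipStar ts
termination_by (cols.map List.length).sum
decreasing_by
  have := pvHeads_sum _ _ _ h
  simp_all
  omega

def get_words_affix_ids_alt (sentence_words : List String) (prefix_dicts : List (List (String × Int))) (suffix_dicts : List (List (String × Int))) : List (List Int) × List (List Int) :=
  let pre_cols := (PySem.List.pyRange 0 4 1).map (fun n =>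
    sentence_words.map (fun w =>
      pvAffixGetD0 (PySem.List.pyGetD prefix_dicts n [])
        (if PySem.Str.len w > n then PySem.Str.slice w none (some (n + 1)) else "")))
  let suf_cols := (PySem.List.pyRange 0 4 1).map (fun n =>
    sentence_words.map (fun w =>
      pvAffixGetD0 (PySem.List.pyGetD suffix_dicts n [])
        (if PySem.Str.len w > n then PySem.Str.slice w (some (-(n + 1))) none else "")))
  (pvZipStar pre_cols, pvZipStar suf_cols)

-- ===== PRECONDITION & SPEC =====
-- Pre_ excludes exactly the inputs where A raises IndexError: a nonempty sentence with
-- fewer than 4 prefix or suffix dicts.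
def Pre_get_words_affix_ids (sentence_words : List String) (prefix_dicts : List (List (String × Int))) (suffix_dicts : List (List (String × Int))) : Prop :=
  sentence_words = [] ∨ (4 ≤ prefix_dicts.length ∧ 4 ≤ suffix_dicts.length)
instance (sentence_words : List String) (prefix_dicts : List (List (String × Int))) (suffix_dicts : List (List (String × Int))) : Decidable (Pre_get_words_affix_ids sentence_words prefix_dicts suffix_dicts) := by unfold Pre_get_words_affix_ids; infer_instance

def pvWitness_get_words_affix_ids : List String × (List (List (String × Int))) × (List (List (String × Int))) :=
  (["ab", "x"], [[("a", 3)], [("ab", 5)], [], []], [[("b", 7)], [], [], []])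

def Spec_get_words_affix_ids (sentence_words : List String) (prefix_dicts : List (List (String × Int))) (suffix_dicts : List (List (String × Int))) (out : List (List Int) × List (List Int)) : Prop := out = get_words_affix_ids_alt sentence_words prefix_dicts suffix_dicts
instance (sentence_words : List String) (prefix_dicts : List (List (String × Int))) (suffix_dicts : List (List (String × Int))) (out : List (List Int) × List (List Int)) : Decidable (Spec_get_words_affix_ids sentence_words prefix_dicts suffix_dicts out) := by unfold Spec_get_words_affix_ids; infer_instance

-- ===== CLAIM (what is proved, stated in full; the proofs are below) =====
def Claim_equal_get_words_affix_ids : Prop := ∀ (sentence_words : List String) (prefix_dicts : List (List (String × Int))) (suffix_dicts : List (List (String × Int))), Dom_get_words_affix_ids sentence_words prefix_dicts suffix_dicts → Pre_get_words_affix_ids sentence_words prefix_dicts suffix_dicts → Spec_get_words_affix_ids sentence_words prefix_dicts suffix_dicts (get_words_affix_ids sentence_words prefix_dicts suffix_dicts)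

-- ===== LEMMAS AND PROOFS =====

-- transposing four mapped columns is mapping the four-entry row
theorem pvZipStar_map4 (l : List String) (f1 f2 f3 f4 : String → Int) :
    pvZipStar [l.map f1, l.map f2, l.map f3, l.map f4]
      = l.map (fun w => [f1 w, f2 w, f3 w, f4 w]) := by
  induction l with
  | nil => simp [pvZipStar, pvHeads]
  | cons w ws ih => simp [pvZipStar, pvHeads, ih]

-- A's pair-of-append foldl is a pair of maps
theorem pv_foldl_pair_map (l : List String) (p s : String → List Int)
    (acc : List (List Int) × List (List Int)) :
    l.foldl (fun acc w => (acc.1 ++ [p w], acc.2 ++ [s w])) acc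
      = (acc.1 ++ l.map p, acc.2 ++ l.map s) := by
  induction l generalizing acc with
  | nil => simp
  | cons w ws ih => simp [ih]

-- per-word: A's ladder row is B's uniform slice-or-'' row
theorem pv_row_eq (pd sd : List (List (String × Int))) (word : String) :
    (let ps := pvGetPrefixesSuffixes word
     ((PySem.List.enumerate ps.1).map
        (fun np => pvAffixGetD0 (PySem.List.pyGetD pd np.1 []) np.2),
      (PySem.List.enumerate ps.2).map
        (fun ns => pvAffixGetD0 (PySem.List.pyGetD sd ns.1 []) ns.2)))
    =
    (((PySem.List.pyRange 0 4 1).map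
        (fun n => pvAffixGetD0 (PySem.List.pyGetD pd n [])
          (if PySem.Str.len word > n then PySem.Str.slice word none (some (n + 1)) else ""))),
      (PySem.List.pyRange 0 4 1).map
        (fun n => pvAffixGetD0 (PySem.List.pyGetD sd n [])
          (if PySem.Str.len word > n then PySem.Str.slice word (some (-(n + 1))) none else ""))) := by
  have hr : PySem.List.pyRange 0 4 1 = [0, 1, 2, 3] := by decide
  have hL : PySem.Str.len word = (word.toList.length : Int) := by
    simp [PySem.Str.len_eq]
  simp only [pvGetPrefixesSuffixes, hr, hL, List.map]
  obtain h | h | h | h | h : word.toList.length = 0 ∨ word.toList.length = 1 ∨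
      word.toList.length = 2 ∨ word.toList.length = 3 ∨ 4 ≤ word.toList.length := by omega
  · norm_num [h, PySem.List.enumerate_cons, PySem.List.enumerate_nil]
  · norm_num [h, PySem.List.enumerate_cons, PySem.List.enumerate_nil]
  · norm_num [h, PySem.List.enumerate_cons, PySem.List.enumerate_nil]
  · norm_num [h, PySem.List.enumerate_cons, PySem.List.enumerate_nil]
  · have e : word.toList.length = word.length := by simp
    have b1 : word.length ≠ 1 := by omega
    have b2 : ¬ ((word.length : Int) = 2) := by omega
    have b3 : ¬ ((word.length : Int) = 3) := by omega
    have q0 : 0 < word.length := by omega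
    have q1 : 1 < word.length := by omega
    have q2 : 2 < word.length := by omega
    have q3 : 3 < word.length := by omega
    norm_num [b1, b2, b3, q0, q1, q2, q3,
      PySem.List.enumerate_cons, PySem.List.enumerate_nil]

theorem get_words_affix_ids_eq (sentence_words : List String) (pd sd : List (List (String × Int))) :
    get_words_affix_ids sentence_words pd sd = get_words_affix_ids_alt sentence_words pd sd := by
  have hr : PySem.List.pyRange 0 4 1 = [0, 1, 2, 3] := by decide
  unfold get_words_affix_ids get_words_affix_ids_alt
  rw [pv_foldl_pair_map sentence_words
    (fun word => (PySem.List.enumerate (pvGetPrefixesSuffixes word).1).map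
      (fun np => pvAffixGetD0 (PySem.List.pyGetD pd np.1 []) np.2))
    (fun word => (PySem.List.enumerate (pvGetPrefixesSuffixes word).2).map
      (fun ns => pvAffixGetD0 (PySem.List.pyGetD sd ns.1 []) ns.2))]
  simp only [hr, List.map, List.nil_append]
  rw [pvZipStar_map4, pvZipStar_map4]
  simp only [Prod.mk.injEq]
  constructor <;>
  · apply List.map_congr_left
    intro w _
    have h := pv_row_eq pd sd w
    simp only [hr, List.map] at h
    first
      | exact congrArg Prod.fst h
      | exact congrArg Prod.snd h

-- ===== VERDICT (by name: the statement is the Claim_ definition above) =====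
theorem get_words_affix_ids_spec : Claim_equal_get_words_affix_ids := by
  intro sw pd sd _ _
  unfold Spec_get_words_affix_ids
  exact get_words_affix_ids_eq sw pd sd
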